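-- pv_equiv track=rewrite | github.com/bgalitsky/halluc_in_health | prolog/pipeline.py | split_prolog_goals
-- ===== SOURCE A (Python) =====
-- def split_prolog_goals(query: str):
--     """
--     Splits a Prolog query into top-level goals, ignoring commas inside parentheses.
--     """
--     goals = []
--     current = ""
--     depth = 0
--     for c in query:
--         if c == "(":
--             depth += 1
--             current += c
--         elif c == ")":
--             depth -= 1
--             current += c
--         elif c == "," and depth == 0:
--             # top-level comma, split here
--             if current.strip():
--                 goals.append(current.strip())
--             current = ""
--         else:
--             current += c
--     if current.strip():
--         goals.append(current.strip())
--     return goals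
-- ===== SOURCE B (Python) =====
-- def _first_cut(s):
--     """Index of the first top-level (depth-0) comma in s, or None."""
--     depth = 0
--     for i, c in enumerate(s):
--         if c == "(":
--             depth += 1
--         elif c == ")":
--             depth -= 1
--         elif c == "," and depth == 0:
--             return i
--     return None
--
--
-- def _go(s):
--     """Recursively split s at the first top-level comma."""
--     i = _first_cut(s)
--     if i is None:
--         return [s]
--     return [s[:i]] + _go(s[i + 1:])
--
--
-- def split_prolog_goals(query: str):
--     out = []
--     for seg in _go(query):
--         g = seg.strip()
--         if g:
--             out.append(g)
--     return out
-- ===== Notes on version B (the rewrite author's own statement) =====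
-- stated objective: alternative
-- what changed: Replaces A's single accumulator scan (goals/current/depth state mutated per character) by a recursive decomposition: a helper finds the index of the first top-level comma, the string is sliced there, and the tail is split recursively; stripping/filtering of segments happens in a separate final pass.
import Mathlib
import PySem

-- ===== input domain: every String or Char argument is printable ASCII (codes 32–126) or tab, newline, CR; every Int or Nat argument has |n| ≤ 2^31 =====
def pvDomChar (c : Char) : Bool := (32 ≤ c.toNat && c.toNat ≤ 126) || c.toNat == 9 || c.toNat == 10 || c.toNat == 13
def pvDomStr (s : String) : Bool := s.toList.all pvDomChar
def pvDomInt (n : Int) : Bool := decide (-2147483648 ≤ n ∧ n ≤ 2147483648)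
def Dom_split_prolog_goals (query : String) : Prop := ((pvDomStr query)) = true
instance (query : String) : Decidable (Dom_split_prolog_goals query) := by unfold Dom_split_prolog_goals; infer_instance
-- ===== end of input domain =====

-- B replaces A's one-pass accumulator scan by recursive splitting at the first top-level comma (alternative decomposition, same cost).

-- ===== PORT A =====
-- one loop step of A: state (goals, current, depth)
def pvAStep (st : List String × List Char × Int) (c : Char) : List String × List Char × Int :=
  let goals := st.1
  let current := st.2.1
  let depth := st.2.2
  if c = '(' then (goals, current ++ [c], depth + 1)
  else if c = ')' then (goals, current ++ [c], depth - 1)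
  else if c = ',' ∧ depth = 0 then
    (if PySem.Chars.strip current ≠ [] then goals ++ [String.mk (PySem.Chars.strip current)] else goals, [], depth)
  else (goals, current ++ [c], depth)

def split_prolog_goals (query : String) : List String :=
  let st := query.toList.foldl pvAStep (([] : List String), ([] : List Char), (0 : Int))
  if PySem.Chars.strip st.2.1 ≠ [] then st.1 ++ [String.mk (PySem.Chars.strip st.2.1)] else st.1

-- ===== PORT B =====
-- _first_cut(s): scan with index i and depth, return index of first depth-0 comma (none = Python None)
def pvFirstCut (i : Nat) (depth : Int) (s : List Char) : Option Nat :=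
  match s with
  | [] => none
  | c :: rest =>
    if c = '(' then pvFirstCut (i + 1) (depth + 1) rest
    else if c = ')' then pvFirstCut (i + 1) (depth - 1) rest
    else if c = ',' ∧ depth = 0 then some i
    else pvFirstCut (i + 1) depth rest

-- bound used for _go's termination
theorem pvFirstCut_bound : ∀ (s : List Char) (j : Nat) (d : Int) (i : Nat),
    pvFirstCut j d s = some i → j ≤ i ∧ i < j + s.length := by
  intro s
  induction s with
  | nil => intro j d i h; simp [pvFirstCut] at h
  | cons c rest ih =>
    intro j d i h
    unfold pvFirstCut at h
    split_ifs at h with h1 h2 h3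
    · have := ih (j + 1) (d + 1) i h; simp [List.length_cons]; omega
    · have := ih (j + 1) (d - 1) i h; simp [List.length_cons]; omega
    · simp at h; simp [List.length_cons]; omega
    · have := ih (j + 1) d i h; simp [List.length_cons]; omega

-- _go(s): split at the first top-level comma, recurse on the rest
def pvGo (s : List Char) : List (List Char) :=
  match h : pvFirstCut 0 0 s with
  | none => [s]
  | some i => s.take i :: pvGo (s.drop (i + 1))
termination_by s.length
decreasing_by
  have := pvFirstCut_bound s 0 0 i h
  simp [List.length_drop]; omega

def split_prolog_goals_alt (query : String) : List String :=
  (pvGo query.toList).foldl (fun out seg =>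
    if PySem.Chars.strip seg ≠ [] then out ++ [String.mk (PySem.Chars.strip seg)] else out) []

-- ===== PRECONDITION & SPEC =====
def Spec_split_prolog_goals (query : String) (out : List String) : Prop := out = split_prolog_goals_alt query
instance (query : String) (out : List String) : Decidable (Spec_split_prolog_goals query out) := by unfold Spec_split_prolog_goals; infer_instance

-- ===== CLAIM (what is proved, stated in full; the proofs are below) =====
def Claim_equal_split_prolog_goals : Prop := ∀ (query : String), Dom_split_prolog_goals query → Spec_split_prolog_goals query (split_prolog_goals query)

-- ===== LEMMAS AND PROOFS =====

-- pvGo generalized over the starting depth of the first segment (A's loop carries that depth mid-segment)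
def pvGoD (d : Int) (s : List Char) : List (List Char) :=
  match h : pvFirstCut 0 d s with
  | none => [s]
  | some i => s.take i :: pvGoD 0 (s.drop (i + 1))
termination_by s.length
decreasing_by
  have := pvFirstCut_bound s 0 d i h
  simp [List.length_drop]; omega

-- strip-and-keep-nonempty, as a foldr over segments
def pvEmit (segs : List (List Char)) : List String :=
  segs.foldr (fun seg acc =>
    if PySem.Chars.strip seg ≠ [] then String.mk (PySem.Chars.strip seg) :: acc else acc) []

-- prepend cur to the head segment
def pvConsHead (cur : List Char) : List (List Char) → List (List Char)
  | [] => []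
  | h :: t => (cur ++ h) :: t

-- A's trailing flush
def pvFinish (st : List String × List Char × Int) : List String :=
  if PySem.Chars.strip st.2.1 ≠ [] then st.1 ++ [String.mk (PySem.Chars.strip st.2.1)] else st.1

theorem pvFirstCut_shift (s : List Char) : ∀ (i : Nat) (d : Int),
    pvFirstCut i d s = (pvFirstCut 0 d s).map (· + i) := by
  induction s with
  | nil => intro i d; simp [pvFirstCut]
  | cons c rest ih =>
    intro i d
    unfold pvFirstCut
    split_ifs with h1 h2 h3
    · rw [ih (i + 1), ih 1, Option.map_map]
      cases pvFirstCut 0 (d + 1) rest <;> simp <;> omega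
    · rw [ih (i + 1), ih 1, Option.map_map]
      cases pvFirstCut 0 (d - 1) rest <;> simp <;> omega
    · simp
    · rw [ih (i + 1), ih 1, Option.map_map]
      cases pvFirstCut 0 d rest <;> simp <;> omega

theorem pvGo_eq_pvGoD (s : List Char) : pvGo s = pvGoD 0 s := by
  rw [pvGo, pvGoD]
  split
  · rfl
  · rename_i i h
    have hb := pvFirstCut_bound s 0 0 i h
    have : (s.drop (i + 1)).length < s.length := by simp [List.length_drop]; omega
    rw [pvGo_eq_pvGoD (s.drop (i + 1))]
termination_by s.length

theorem pvGoD_ne_nil (d : Int) (s : List Char) : pvGoD d s ≠ [] := by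
  rw [pvGoD]; split <;> simp

theorem pvConsHead_nil (l : List (List Char)) (h : l ≠ []) : pvConsHead [] l = l := by
  cases l with
  | nil => exact absurd rfl h
  | cons a t => simp [pvConsHead]

theorem pvEmit_cons (seg : List Char) (segs : List (List Char)) :
    pvEmit (seg :: segs) =
      (if PySem.Chars.strip seg ≠ [] then [String.mk (PySem.Chars.strip seg)] else []) ++ pvEmit segs := by
  simp [pvEmit]; split <;> simp

-- pvGoD on a non-splitting character: the head segment grows
theorem pvGoD_step (c : Char) (s : List Char) (d d' : Int) (cur : List Char)
    (h : pvFirstCut 0 d (c :: s) = (pvFirstCut 0 d' s).map (· + 1)) :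
    pvConsHead cur (pvGoD d (c :: s)) = pvConsHead (cur ++ [c]) (pvGoD d' s) := by
  rw [pvGoD, pvGoD]
  rcases heq : pvFirstCut 0 d' s with _ | i
  · rw [show pvFirstCut 0 d (c :: s) = none by rw [h, heq]; rfl]
    simp [pvConsHead]
  · rw [show pvFirstCut 0 d (c :: s) = some (i + 1) by rw [h, heq]; rfl]
    simp [pvConsHead, List.take_succ_cons, List.drop_succ_cons]

theorem pvMain (s : List Char) : ∀ (goals : List String) (cur : List Char) (d : Int),
    pvFinish (s.foldl pvAStep (goals, cur, d)) = goals ++ pvEmit (pvConsHead cur (pvGoD d s)) := by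
  induction s with
  | nil =>
    intro goals cur d
    have : pvGoD d [] = [[]] := by rw [pvGoD]; rfl
    rw [this]
    simp [pvFinish, pvConsHead, pvEmit]
    split <;> simp
  | cons c rest ih =>
    intro goals cur d
    rw [List.foldl_cons]
    by_cases h1 : c = '('
    · rw [show pvAStep (goals, cur, d) c = (goals, cur ++ [c], d + 1) by simp [pvAStep, h1]]
      rw [ih, pvGoD_step c rest d (d + 1) cur (by simp only [pvFirstCut, h1, reduceIte]; exact pvFirstCut_shift rest 1 _)]
    · by_cases h2 : c = ')'
      · rw [show pvAStep (goals, cur, d) c = (goals, cur ++ [c], d - 1) by simp [pvAStep, h1, h2]]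
        rw [ih, pvGoD_step c rest d (d - 1) cur (by simp only [pvFirstCut, h1, h2, reduceIte]; exact pvFirstCut_shift rest 1 _)]
      · by_cases h3 : c = ',' ∧ d = 0
        · rw [show pvAStep (goals, cur, d) c =
              ((if PySem.Chars.strip cur ≠ [] then goals ++ [String.mk (PySem.Chars.strip cur)] else goals), [], d) by
            simp [pvAStep, h1, h2, h3]]
          obtain ⟨hc, hd⟩ := h3
          subst hc hd
          rw [ih]
          have hfc : pvFirstCut 0 0 (',' :: rest) = some 0 := by unfold pvFirstCut; simp
          rw [show pvGoD 0 (',' :: rest) = [] :: pvGoD 0 rest by rw [pvGoD]; rw [hfc]; rfl]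
          rw [pvConsHead_nil _ (pvGoD_ne_nil 0 rest)]
          rw [show pvConsHead cur ([] :: pvGoD 0 rest) = cur :: pvGoD 0 rest by simp [pvConsHead]]
          rw [pvEmit_cons]
          split <;> simp
        · rw [show pvAStep (goals, cur, d) c = (goals, cur ++ [c], d) by simp [pvAStep, h1, h2, h3]]
          rw [ih, pvGoD_step c rest d d cur (by simp only [pvFirstCut, h1, h2, h3, reduceIte]; exact pvFirstCut_shift rest 1 _)]

theorem pvBLoop (segs : List (List Char)) : ∀ (out : List String),
    segs.foldl (fun out seg =>
      if PySem.Chars.strip seg ≠ [] then out ++ [String.mk (PySem.Chars.strip seg)] else out) out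
    = out ++ pvEmit segs := by
  induction segs with
  | nil => intro out; simp [pvEmit]
  | cons seg rest ih =>
    intro out
    rw [List.foldl_cons, pvEmit_cons, ih]
    split <;> simp

-- ===== VERDICT (by name: the statement is the Claim_ definition above) =====
theorem split_prolog_goals_spec : Claim_equal_split_prolog_goals := by
  intro query _
  unfold Spec_split_prolog_goals split_prolog_goals split_prolog_goals_alt
  have hA := pvMain query.toList [] [] 0
  rw [pvConsHead_nil _ (pvGoD_ne_nil 0 query.toList)] at hA
  rw [pvBLoop, pvGo_eq_pvGoD]
  simpa [pvFinish] using hA
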